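-- pv_equiv track=rewrite | github.com/Jollu8/LeetCode | 3982-maximum-walls-destroyed-by-robots/maximum-walls-destroyed-by-robots.py | maxWalls
-- ===== SOURCE A (Python) =====
-- from typing import List
--
-- def maxWalls(robots: List[int], distance: List[int], walls: List[int]) -> int:
--     n = len(robots)
--     # pair robots with their distances and sort by position
--     rob = sorted(zip(robots, distance))
--     p = [r[0] for r in rob]
--     d = [r[1] for r in rob]
--
--     # count walls that are exactly at a robot position
--     robot_set = set(p)
--     ans0 = 0
--     walls_filtered = []
--     for w in walls:
--         if w in robot_set:
--             ans0 += 1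
--         else:
--             walls_filtered.append(w)
--     walls_filtered.sort()
--     m = len(walls_filtered)
--
--     if m == 0:
--         return ans0
--
--     # ----- left region (walls before the first robot) -----
--     left_count = 0
--     j = 0
--     while j < m and walls_filtered[j] < p[0]:
--         if walls_filtered[j] >= p[0] - d[0]:
--             left_count += 1
--         j += 1
--
--     # ----- gaps between consecutive robots -----
--     # for each gap we store: only left robot can cover, only right robot can cover, both can cover
--     left_only = [0] * (n - 1)
--     right_only = [0] * (n - 1)
--     both = [0] * (n - 1)
--
--     for i in range(n - 1):
--         start = p[i]
--         end = p[i + 1]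
--         while j < m and walls_filtered[j] < end:
--             if walls_filtered[j] > start:
--                 distL = walls_filtered[j] - start
--                 distR = end - walls_filtered[j]
--                 if distL <= d[i] and distR <= d[i + 1]:
--                     both[i] += 1
--                 elif distL <= d[i]:
--                     left_only[i] += 1
--                 elif distR <= d[i + 1]:
--                     right_only[i] += 1
--                 # else: not coverable by any robot
--             j += 1
--
--     # ----- right region (walls after the last robot) -----
--     right_count = 0
--     while j < m and walls_filtered[j] <= p[-1] + d[-1]:
--         right_count += 1
--         j += 1
--
--     # ----- DP over robots -----
--     # dpL: best total if current robot fires left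
--     # dpR: best total if current robot fires right
--     dpL = left_count   # robot 0 fires left
--     dpR = 0            # robot 0 fires right
--
--     for i in range(1, n):
--         idx = i - 1
--         A = left_only[idx] + both[idx]      # covered if left robot fires right
--         B = right_only[idx] + both[idx]     # covered if right robot fires left
--         C = left_only[idx] + right_only[idx] + both[idx]  # covered if both fire appropriately
--
--         new_dpL = max(dpL + B, dpR + C)   # current robot fires left
--         new_dpR = max(dpL, dpR + A)       # current robot fires right
--         dpL, dpR = new_dpL, new_dpR
--
--     result = ans0 + max(dpL, dpR + right_count)
--     return result
-- ===== SOURCE B (Python) =====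
-- from typing import List
--
-- def maxWalls(robots: List[int], distance: List[int], walls: List[int]) -> int:
--     rob = sorted(zip(robots, distance))
--     pos = {x for x, _ in rob}
--     ans0 = sum(1 for w in walls if w in pos)
--     wf = sorted(w for w in walls if w not in pos)
--     if not wf:
--         return ans0
--     p0, d0 = rob[0]
--     pn, dn = rob[-1]
--     # robot 0 fires left / fires right
--     dpL = sum(1 for w in wf if p0 - d0 <= w < p0)
--     dpR = 0
--     for (s, ds), (e, de) in zip(rob, rob[1:]):
--         both = sum(1 for w in wf if s < w < e and w - s <= ds and e - w <= de)
--         left = sum(1 for w in wf if s < w < e and w - s <= ds) - both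
--         right = sum(1 for w in wf if s < w < e and e - w <= de) - both
--         dpL, dpR = max(dpL + right + both, dpR + left + right + both), max(dpL, dpR + left + both)
--     rc = sum(1 for w in wf if pn < w <= pn + dn)
--     return ans0 + max(dpL, dpR + rc)
-- ===== Notes on version B (the rewrite author's own statement) =====
-- stated objective: alternative
-- what changed: The shared-pointer sweep that walks the sorted wall list once, classifying each wall into left-region/gap-bucket/right-region state machines, is replaced by independent interval-count queries (one comprehension per region and per gap, with the exclusive buckets derived by count subtraction) feeding the two-state DP inline.
import Mathlib
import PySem

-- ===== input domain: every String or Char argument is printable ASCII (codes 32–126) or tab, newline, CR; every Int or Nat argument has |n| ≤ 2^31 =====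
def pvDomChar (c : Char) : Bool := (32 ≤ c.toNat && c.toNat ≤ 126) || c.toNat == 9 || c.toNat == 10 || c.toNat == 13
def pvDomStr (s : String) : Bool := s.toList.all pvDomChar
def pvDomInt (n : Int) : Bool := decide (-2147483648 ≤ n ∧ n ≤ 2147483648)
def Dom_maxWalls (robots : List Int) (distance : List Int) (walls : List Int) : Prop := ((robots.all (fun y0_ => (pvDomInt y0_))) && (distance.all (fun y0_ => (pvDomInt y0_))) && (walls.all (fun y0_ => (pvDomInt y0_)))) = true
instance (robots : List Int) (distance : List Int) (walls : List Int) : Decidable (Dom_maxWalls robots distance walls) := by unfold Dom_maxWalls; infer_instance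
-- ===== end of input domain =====

-- B replaces A's single shared-pointer sweep over the sorted wall list by independent
-- per-region / per-gap interval counts feeding the same two-state DP inline (objective: alternative).

-- ===== PORT A =====
-- while j < m and walls_filtered[j] < p[0]: count those >= p[0]-d[0]; returns (count, remaining suffix)
def pvLeftLoop (p0 d0 c : Int) : List Int → Int × List Int
  | [] => (c, [])
  | w :: ws =>
    if w < p0 then pvLeftLoop p0 d0 (if p0 - d0 ≤ w then c + 1 else c) ws
    else (c, w :: ws)

-- inner while of the gap loop: consume walls < e, classifying into (left_only, right_only, both)
def pvGapLoop (s ds e de : Int) (acc : Int × Int × Int) : List Int → (Int × Int × Int) × List Int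
  | [] => (acc, [])
  | w :: ws =>
    if w < e then
      pvGapLoop s ds e de
        (if w > s then
          (if w - s ≤ ds ∧ e - w ≤ de then (acc.1, acc.2.1, acc.2.2 + 1)
           else if w - s ≤ ds then (acc.1 + 1, acc.2.1, acc.2.2)
           else if e - w ≤ de then (acc.1, acc.2.1 + 1, acc.2.2)
           else acc)
         else acc) ws
    else (acc, w :: ws)

-- for i in range(n-1): the gap between consecutive sorted robots, threading the shared suffix
def pvGapsLoop : Int × Int → List (Int × Int) → List Int → List (Int × Int × Int) × List Int
  | _, [], ws => ([], ws)
  | (s, ds), (e, de) :: rest, ws =>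
    let r := pvGapLoop s ds e de (0, 0, 0) ws
    let r2 := pvGapsLoop (e, de) rest r.2
    (r.1 :: r2.1, r2.2)

-- while j < m and walls_filtered[j] <= p[-1] + d[-1]: right_count += 1
def pvRightLoop (bound c : Int) : List Int → Int
  | [] => c
  | w :: ws => if w ≤ bound then pvRightLoop bound (c + 1) ws else c

-- for i in range(1, n): the two-state DP over the per-gap triples
def pvDpLoop : List (Int × Int × Int) → Int × Int → Int × Int
  | [], st => st
  | (lo, ro, bo) :: ts, (dpL, dpR) =>
    pvDpLoop ts (max (dpL + (ro + bo)) (dpR + (lo + ro + bo)), max dpL (dpR + (lo + bo)))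

def maxWalls (robots : List Int) (distance : List Int) (walls : List Int) : Int :=
  let rob := PySem.List.sorted2 (robots.zip distance) Prod.fst Prod.snd
  let p := rob.map (fun r => r.1)
  let robot_set : PySem.Set Int := PySem.Set.ofList p
  let z := walls.foldl
    (fun (st : Int × List Int) w =>
      if robot_set.contains w then (st.1 + 1, st.2) else (st.1, st.2 ++ [w]))
    (0, [])
  let ans0 := z.1
  let wf := PySem.List.sorted z.2 (fun x => x) false
  if wf = [] then ans0
  else
    match rob with
    | [] => ans0 -- unreachable under Pre_: Python raises IndexError on p[0]
    | (p0, d0) :: restRob =>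
      let lc := pvLeftLoop p0 d0 0 wf
      let g := pvGapsLoop (p0, d0) restRob lc.2
      let lastR := restRob.getLastD (p0, d0)
      let rc := pvRightLoop (lastR.1 + lastR.2) 0 g.2
      let dp := pvDpLoop g.1 (lc.1, 0)
      ans0 + max dp.1 (dp.2 + rc)

-- ===== PORT B =====
def maxWalls_alt (robots : List Int) (distance : List Int) (walls : List Int) : Int :=
  let rob := PySem.List.sorted2 (robots.zip distance) Prod.fst Prod.snd
  let pos : PySem.Set Int := PySem.Set.ofList (rob.map (fun r => r.1))
  let ans0 : Int := (walls.countP (fun w => pos.contains w) : Int)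
  let wf := PySem.List.sorted (walls.filter (fun w => !(pos.contains w))) (fun x => x) false
  if wf = [] then ans0
  else
    match rob with
    | [] => ans0 -- unreachable under Pre_: Source B raises IndexError on rob[0]
    | (p0, d0) :: restRob =>
      let lastR := restRob.getLastD (p0, d0)
      let dp0 : Int × Int := ((wf.countP (fun w => decide (p0 - d0 ≤ w ∧ w < p0)) : Int), 0)
      let dp := (rob.zip rob.tail).foldl
        (fun (st : Int × Int) pr =>
          let bo : Int := (wf.countP (fun w =>
            decide (pr.1.1 < w ∧ w < pr.2.1 ∧ w - pr.1.1 ≤ pr.1.2 ∧ pr.2.1 - w ≤ pr.2.2)) : Int)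
          let lo : Int := (wf.countP (fun w =>
            decide (pr.1.1 < w ∧ w < pr.2.1 ∧ w - pr.1.1 ≤ pr.1.2)) : Int) - bo
          let ro : Int := (wf.countP (fun w =>
            decide (pr.1.1 < w ∧ w < pr.2.1 ∧ pr.2.1 - w ≤ pr.2.2)) : Int) - bo
          (max (st.1 + ro + bo) (st.2 + lo + ro + bo), max st.1 (st.2 + lo + bo)))
        dp0
      let rc : Int := (wf.countP (fun w => decide (lastR.1 < w ∧ w ≤ lastR.1 + lastR.2)) : Int)
      ans0 + max dp.1 (dp.2 + rc)

-- ===== PRECONDITION & SPEC =====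
-- Pre_ is exactly where Python A returns: it excludes only inputs with empty robots or a
-- distance list shorter than robots on which some wall survives the robot-position filter
-- (the paired robot positions are robots.take (min |robots| |distance|)); there A raises IndexError.
def Pre_maxWalls (robots : List Int) (distance : List Int) (walls : List Int) : Prop :=
  (robots ≠ [] ∧ robots.length ≤ distance.length) ∨
    (∀ w ∈ walls, w ∈ robots.take (min robots.length distance.length))
instance (robots : List Int) (distance : List Int) (walls : List Int) : Decidable (Pre_maxWalls robots distance walls) := by unfold Pre_maxWalls; infer_instance

def pvWitness_maxWalls : List Int × List Int × List Int := ([3, 0], [1, 2], [1, 2, 5, 3])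

def Spec_maxWalls (robots : List Int) (distance : List Int) (walls : List Int) (out : Int) : Prop := out = maxWalls_alt robots distance walls
instance (robots : List Int) (distance : List Int) (walls : List Int) (out : Int) : Decidable (Spec_maxWalls robots distance walls out) := by unfold Spec_maxWalls; infer_instance

-- ===== CLAIM (what is proved, stated in full; the proofs are below) =====
def Claim_equal_maxWalls : Prop := ∀ (robots : List Int) (distance : List Int) (walls : List Int), Dom_maxWalls robots distance walls → Pre_maxWalls robots distance walls → Spec_maxWalls robots distance walls (maxWalls robots distance walls)


-- ===== LEMMAS AND PROOFS =====

-- the three exclusive gap buckets of A, as counts over a wall list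
def pvPB (s ds e de w : Int) : Bool := decide (s < w ∧ w < e ∧ w - s ≤ ds ∧ e - w ≤ de)
def pvPL (s ds e de w : Int) : Bool := decide (s < w ∧ w < e ∧ w - s ≤ ds ∧ ¬(e - w ≤ de))
def pvPR (s ds e de w : Int) : Bool := decide (s < w ∧ w < e ∧ ¬(w - s ≤ ds) ∧ e - w ≤ de)
def pvTriple (wf : List Int) (pr : (Int × Int) × (Int × Int)) : Int × Int × Int :=
  ((wf.countP (pvPL pr.1.1 pr.1.2 pr.2.1 pr.2.2) : Int),
   (wf.countP (pvPR pr.1.1 pr.1.2 pr.2.1 pr.2.2) : Int),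
   (wf.countP (pvPB pr.1.1 pr.1.2 pr.2.1 pr.2.2) : Int))

theorem pv_countP_split (l : List Int) (p q : Int → Bool) :
    l.countP p = (l.countP fun a => p a && q a) + (l.countP fun a => p a && !q a) := by
  induction l with
  | nil => rfl
  | cons w t ih =>
    simp only [List.countP_cons, ih]
    by_cases hp : p w <;> by_cases hq : q w <;> simp [hp, hq] <;> omega

theorem pv_mem_map_fst_zip (as bs : List Int) (w : Int) :
    w ∈ (as.zip bs).map (fun r : Int × Int => r.1) ↔
      w ∈ as.take (min as.length bs.length) := by
  induction as generalizing bs with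
  | nil => simp
  | cons a t ih =>
    cases bs with
    | nil => simp
    | cons b bt => simp [List.zip_cons_cons, Nat.succ_min_succ, ih]

theorem pv_filterLoop_eq (f : Int → Bool) (walls : List Int) (c : Int) (acc : List Int) :
    walls.foldl
      (fun (st : Int × List Int) w =>
        if f w then (st.1 + 1, st.2) else (st.1, st.2 ++ [w])) (c, acc) =
    (c + (walls.countP f : Int), acc ++ walls.filter (fun w => !f w)) := by
  induction walls generalizing c acc with
  | nil => simp
  | cons w t ih =>
    simp only [List.foldl_cons, List.countP_cons, List.filter_cons]
    by_cases h : f w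
    · rw [if_pos h, ih]
      simp only [h, Bool.not_true, Bool.false_eq_true, if_false, Prod.mk.injEq]
      refine ⟨by push_cast; ring, trivial⟩
    · rw [if_neg h, ih]
      simp only [h, Bool.not_false, if_true, Prod.mk.injEq, if_neg h]
      refine ⟨by simp [h], by simp⟩

theorem pv_leftLoop_eq (p0 d0 : Int) (ws : List Int) (c : Int)
    (h : ws.Pairwise (fun a b => a ≤ b)) :
    pvLeftLoop p0 d0 c ws =
      (c + (ws.countP (fun w => decide (p0 - d0 ≤ w ∧ w < p0)) : Int),
       ws.dropWhile (fun w => decide (w < p0))) := by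
  induction ws generalizing c with
  | nil => simp [pvLeftLoop]
  | cons w t ih =>
    rcases List.pairwise_cons.mp h with ⟨hw, ht⟩
    by_cases hlt : w < p0
    · rw [pvLeftLoop, if_pos hlt, ih _ ht]
      simp only [List.countP_cons, List.dropWhile_cons, hlt, decide_true, if_true,
        Prod.mk.injEq]
      refine ⟨?_, trivial⟩
      by_cases hge : p0 - d0 ≤ w <;> simp [hge, hlt] <;> push_cast <;> ring
    · rw [pvLeftLoop, if_neg hlt]
      have hz : (w :: t).countP (fun w => decide (p0 - d0 ≤ w ∧ w < p0)) = 0 := by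
        rw [List.countP_eq_zero]
        intro a ha
        simp only [decide_eq_true_eq, not_and]
        intro _
        rcases List.mem_cons.mp ha with rfl | hat
        · omega
        · have := hw a hat; omega
      rw [hz]
      simp [hlt]

theorem pv_gapLoop_eq (s ds e de : Int) (ws : List Int) (l r b : Int)
    (h : ws.Pairwise (fun a b => a ≤ b)) :
    pvGapLoop s ds e de (l, r, b) ws =
      ((l + (ws.countP (pvPL s ds e de) : Int),
        r + (ws.countP (pvPR s ds e de) : Int),
        b + (ws.countP (pvPB s ds e de) : Int)),
       ws.dropWhile (fun w => decide (w < e))) := by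
  induction ws generalizing l r b with
  | nil => simp [pvGapLoop]
  | cons w t ih =>
    rcases List.pairwise_cons.mp h with ⟨hw, ht⟩
    by_cases hlt : w < e
    · have hacc :
          (if w > s then
            (if w - s ≤ ds ∧ e - w ≤ de then (l, r, b + 1)
             else if w - s ≤ ds then (l + 1, r, b)
             else if e - w ≤ de then (l, r + 1, b)
             else (l, r, b))
           else (l, r, b)) =
          (l + (if pvPL s ds e de w = true then (1 : Int) else 0),
           r + (if pvPR s ds e de w = true then (1 : Int) else 0),
           b + (if pvPB s ds e de w = true then (1 : Int) else 0)) := by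
        by_cases hs : s < w <;> by_cases h1 : w - s ≤ ds <;> by_cases h2 : e - w ≤ de <;>
          simp [pvPL, pvPR, pvPB, hs, h1, h2, hlt, gt_iff_lt]
      rw [pvGapLoop, if_pos hlt, hacc, ih _ _ _ ht]
      simp only [List.countP_cons, List.dropWhile_cons, hlt, decide_true, if_true,
        Prod.mk.injEq]
      refine ⟨⟨?_, ?_, ?_⟩, ?_⟩
      all_goals first
        | trivial
        | (split_ifs <;> push_cast <;> ring)
        | (push_cast; ring)
    · rw [pvGapLoop, if_neg hlt]
      have hz : ∀ (p : Int → Bool), (∀ a, p a = true → a < e) →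
          (w :: t).countP p = 0 := by
        intro p hp
        rw [List.countP_eq_zero]
        intro a ha hpa
        have hae := hp a hpa
        rcases List.mem_cons.mp ha with rfl | hat
        · exact hlt hae
        · have := hw a hat; omega
      rw [hz _ (by intro a ha; simp only [pvPL, decide_eq_true_eq] at ha; exact ha.2.1),
          hz _ (by intro a ha; simp only [pvPR, decide_eq_true_eq] at ha; exact ha.2.1),
          hz _ (by intro a ha; simp only [pvPB, decide_eq_true_eq] at ha; exact ha.2.1)]
      simp [hlt]

theorem pv_rightLoop_eq (bound : Int) (ws : List Int) (c : Int)
    (h : ws.Pairwise (fun a b => a ≤ b)) :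
    pvRightLoop bound c ws = c + (ws.countP (fun w => decide (w ≤ bound)) : Int) := by
  induction ws generalizing c with
  | nil => simp [pvRightLoop]
  | cons w t ih =>
    rcases List.pairwise_cons.mp h with ⟨hw, ht⟩
    by_cases hle : w ≤ bound
    · rw [pvRightLoop, if_pos hle, ih _ ht]
      simp [List.countP_cons, hle]
      ring
    · rw [pvRightLoop, if_neg hle]
      have hz : (w :: t).countP (fun w => decide (w ≤ bound)) = 0 := by
        rw [List.countP_eq_zero]
        intro a ha
        rcases List.mem_cons.mp ha with rfl | hat
        · simp [hle]
        · have := hw a hat; simp; omega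
      simp [hz]

theorem pv_countP_dropWhile_lt (x : Int) (q : Int → Bool) (wf : List Int)
    (hq : ∀ w, w < x → q w = false) :
    (wf.dropWhile (fun w => decide (w < x))).countP q = wf.countP q := by
  conv_rhs => rw [← List.takeWhile_append_dropWhile (p := fun w => decide (w < x)) (l := wf)]
  rw [List.countP_append]
  have hz : (wf.takeWhile (fun w => decide (w < x))).countP q = 0 := by
    rw [List.countP_eq_zero]
    intro a ha
    have := List.mem_takeWhile_imp ha
    simp only [decide_eq_true_eq] at this
    simp [hq a this]
  omega

theorem pv_dropWhile_dropWhile (x y : Int) (l : List Int) (hxy : x ≤ y) :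
    (l.dropWhile (fun w => decide (w < x))).dropWhile (fun w => decide (w < y)) =
      l.dropWhile (fun w => decide (w < y)) := by
  induction l with
  | nil => rfl
  | cons w t ih =>
    by_cases h : w < x
    · rw [List.dropWhile_cons, if_pos (by simpa using h), ih,
        List.dropWhile_cons, if_pos (by simp; omega)]
    · rw [List.dropWhile_cons, if_neg (by simpa using h)]

theorem pv_mem_dropWhile_not_lt (x : Int) (wf : List Int)
    (h : wf.Pairwise (fun a b => a ≤ b)) :
    ∀ w ∈ wf.dropWhile (fun w => decide (w < x)), ¬ (w < x) := by
  induction wf with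
  | nil => simp
  | cons w t ih =>
    rcases List.pairwise_cons.mp h with ⟨hw, ht⟩
    by_cases hlt : w < x
    · rw [List.dropWhile_cons, if_pos (by simpa using hlt)]
      exact ih ht
    · rw [List.dropWhile_cons, if_neg (by simpa using hlt)]
      intro a ha
      rcases List.mem_cons.mp ha with rfl | hat
      · exact hlt
      · have := hw a hat; omega

theorem pv_gapsLoop_eq (wf : List Int) (hwf : wf.Pairwise (fun a b => a ≤ b)) :
    ∀ (rest : List (Int × Int)) (s ds : Int),
    ((s, ds) :: rest).Pairwise (fun a b => a.1 ≤ b.1) →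
    pvGapsLoop (s, ds) rest (wf.dropWhile (fun w => decide (w < s))) =
      ((((s, ds) :: rest).zip rest).map (pvTriple wf),
       wf.dropWhile (fun w => decide (w < (rest.getLastD (s, ds)).1))) := by
  intro rest
  induction rest with
  | nil => intro s ds _; simp [pvGapsLoop]
  | cons ede rest' ih =>
    intro s ds hchain
    obtain ⟨e, de⟩ := ede
    rcases List.pairwise_cons.mp hchain with ⟨hhead, htail⟩
    have hse : s ≤ e := hhead (e, de) List.mem_cons_self
    have hsuf : (wf.dropWhile (fun w => decide (w < s))).Pairwise (fun a b => a ≤ b) :=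
      List.Pairwise.sublist (List.dropWhile_sublist _) hwf
    rw [List.getLastD_cons, List.zip_cons_cons, List.map_cons, pvGapsLoop]
    rw [pv_gapLoop_eq s ds e de _ 0 0 0 hsuf]
    have hcnt : ∀ (p : Int → Bool), (∀ w, w < s → p w = false) →
        (wf.dropWhile (fun w => decide (w < s))).countP p = wf.countP p :=
      fun p hp => pv_countP_dropWhile_lt s p wf hp
    rw [hcnt _ (by
          intro w hw
          rw [pvPL, decide_eq_false_iff_not]
          rintro ⟨h', -⟩; omega),
        hcnt _ (by
          intro w hw
          rw [pvPR, decide_eq_false_iff_not]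
          rintro ⟨h', -⟩; omega),
        hcnt _ (by
          intro w hw
          rw [pvPB, decide_eq_false_iff_not]
          rintro ⟨h', -⟩; omega),
        pv_dropWhile_dropWhile s e wf hse,
        ih e de htail]
    simp [pvTriple]

theorem pv_dpLoop_eq (wf : List Int) (prs : List ((Int × Int) × (Int × Int))) (st : Int × Int) :
    pvDpLoop (prs.map (pvTriple wf)) st =
      prs.foldl
        (fun (st : Int × Int) pr =>
          let bo : Int := (wf.countP (fun w =>
            decide (pr.1.1 < w ∧ w < pr.2.1 ∧ w - pr.1.1 ≤ pr.1.2 ∧ pr.2.1 - w ≤ pr.2.2)) : Int)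
          let lo : Int := (wf.countP (fun w =>
            decide (pr.1.1 < w ∧ w < pr.2.1 ∧ w - pr.1.1 ≤ pr.1.2)) : Int) - bo
          let ro : Int := (wf.countP (fun w =>
            decide (pr.1.1 < w ∧ w < pr.2.1 ∧ pr.2.1 - w ≤ pr.2.2)) : Int) - bo
          (max (st.1 + ro + bo) (st.2 + lo + ro + bo), max st.1 (st.2 + lo + bo))) st := by
  induction prs generalizing st with
  | nil => rfl
  | cons pr rest ih =>
    rw [List.map_cons, List.foldl_cons, pvDpLoop, ih]
    congr 1
    obtain ⟨⟨s, ds⟩, ⟨e, de⟩⟩ := pr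
    have hBo : (fun w => decide (s < w ∧ w < e ∧ w - s ≤ ds ∧ e - w ≤ de)) = pvPB s ds e de :=
      rfl
    have hL : wf.countP (fun w => decide (s < w ∧ w < e ∧ w - s ≤ ds)) =
        wf.countP (pvPB s ds e de) + wf.countP (pvPL s ds e de) := by
      rw [pv_countP_split wf _ (fun w => decide (e - w ≤ de))]
      congr 1 <;> apply List.countP_congr <;> intro w _ <;> simp [pvPB, pvPL] <;> tauto
    have hR : wf.countP (fun w => decide (s < w ∧ w < e ∧ e - w ≤ de)) =
        wf.countP (pvPB s ds e de) + wf.countP (pvPR s ds e de) := by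
      rw [pv_countP_split wf _ (fun w => decide (w - s ≤ ds))]
      congr 1 <;> apply List.countP_congr <;> intro w _ <;> simp [pvPB, pvPR] <;> tauto
    simp only [pvTriple, hBo, hL, hR]
    refine Prod.ext ?_ ?_ <;> simp only [] <;> push_cast <;> (congr 1 <;> ring)

-- sorted2 with keys fst/snd yields a list Pairwise-ordered on the first component
theorem pv_insertBy_pairwise_fst (x : Int × Int) (ys : List (Int × Int))
    (h : ys.Pairwise (fun a b => a.1 ≤ b.1)) :
    (PySem.List.insertBy
        (fun a b => decide (a.1 < b.1) || (!decide (b.1 < a.1) && decide (a.2 < b.2))) x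
        ys).Pairwise (fun a b => a.1 ≤ b.1) := by
  induction ys with
  | nil => simp [PySem.List.insertBy]
  | cons y t ih =>
    rcases List.pairwise_cons.mp h with ⟨hy, ht⟩
    rw [PySem.List.insertBy]
    by_cases hb : (decide (x.1 < y.1) || (!decide (y.1 < x.1) && decide (x.2 < y.2))) = true
    · rw [if_pos hb]
      have hxy : x.1 ≤ y.1 := by
        rcases Bool.or_eq_true_iff.mp hb with h1 | h1
        · have := of_decide_eq_true h1; omega
        · have h2 : ¬ (y.1 < x.1) := by
            have := (Bool.and_eq_true_iff.mp h1).1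
            simpa using this
          omega
      refine List.pairwise_cons.mpr ⟨?_, h⟩
      intro a ha
      rcases List.mem_cons.mp ha with rfl | hat
      · exact hxy
      · have := hy a hat; omega
    · rw [if_neg hb]
      have hyx : y.1 ≤ x.1 := by
        have h1 : ¬ (x.1 < y.1) := by
          intro hc
          exact hb (Bool.or_eq_true_iff.mpr (Or.inl (decide_eq_true hc)))
        omega
      refine List.pairwise_cons.mpr ⟨?_, ih ht⟩
      intro a ha
      rcases (PySem.List.mem_insertBy _ _ _ _).mp ha with rfl | hat
      · exact hyx
      · exact hy a hat

theorem pv_sorted2_pairwise_fst (xs : List (Int × Int)) :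
    (PySem.List.sorted2 xs Prod.fst Prod.snd false).Pairwise (fun a b => a.1 ≤ b.1) := by
  unfold PySem.List.sorted2
  simp only []
  generalize hacc : ([] : List (Int × Int)) = acc
  have hp : acc.Pairwise (fun a b => a.1 ≤ b.1) := by rw [← hacc]; exact List.Pairwise.nil
  clear hacc
  induction xs generalizing acc with
  | nil => exact hp
  | cons x t ih => exact ih _ (pv_insertBy_pairwise_fst x acc hp)

-- ===== VERDICT (by name: the statement is the Claim_ definition above) =====
theorem maxWalls_spec : Claim_equal_maxWalls := by
  intro robots distance walls _ hpre
  unfold Spec_maxWalls maxWalls maxWalls_alt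
  simp only [pv_filterLoop_eq, zero_add, List.nil_append]
  rcases hpre with ⟨hne, hlen⟩ | hall
  case inr =>
    -- every wall sits on a robot position: the filtered wall list is empty and
    -- both sides return ans0
    have hnil : walls.filter
        (fun w => !(PySem.Set.ofList
          ((PySem.List.sorted2 (robots.zip distance) Prod.fst Prod.snd false).map
            (fun r => r.1))).contains w) = [] := by
      rw [List.filter_eq_nil_iff]
      intro w hw
      have hmem : w ∈ (PySem.List.sorted2 (robots.zip distance) Prod.fst Prod.snd false).map
          (fun r => r.1) := by
        have h1 : w ∈ (robots.zip distance).map (fun r : Int × Int => r.1) :=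
          (pv_mem_map_fst_zip robots distance w).mpr (hall w hw)
        exact ((PySem.List.sorted2_perm (robots.zip distance) Prod.fst Prod.snd false).map
          (fun r : Int × Int => r.1)).mem_iff.mpr h1
      simp [PySem.Set.contains_iff, PySem.Set.mem_ofList, hmem]
    rw [hnil]
    rfl
  have hrobpair := pv_sorted2_pairwise_fst (robots.zip distance)
  have hroblen := (PySem.List.sorted2_perm (robots.zip distance) Prod.fst Prod.snd false).length_eq
  generalize hrc : PySem.List.sorted2 (robots.zip distance) Prod.fst Prod.snd false = rob at hrobpair hroblen ⊢
  rw [List.length_zip] at hroblen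
  have hrobne : rob ≠ [] := by
    intro h
    rw [h] at hroblen
    simp at hroblen
    have : robots.length = 0 := by omega
    exact hne (List.length_eq_zero_iff.mp this)
  cases rob with
  | nil => exact absurd rfl hrobne
  | cons hd tl =>
    obtain ⟨p0, d0⟩ := hd
    by_cases hwf0 :
        PySem.List.sorted
          (walls.filter (fun w =>
            !(PySem.Set.ofList (((p0, d0) :: tl).map (fun r => r.1))).contains w))
          (fun x => x) false = []
    · rw [if_pos hwf0, if_pos hwf0]
    · rw [if_neg hwf0, if_neg hwf0]
      generalize hwfc : PySem.List.sorted
          (walls.filter (fun w =>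
            !(PySem.Set.ofList (((p0, d0) :: tl).map (fun r => r.1))).contains w))
          (fun x => x) false = wf at hwf0 ⊢
      have hwfpair : wf.Pairwise (fun a b => a ≤ b) := by
        rw [← hwfc]
        exact PySem.List.sorted_pairwise _ (fun x => x)
      have hmemwf : ∀ w ∈ wf, w ∉ ((p0, d0) :: tl).map (fun r => r.1) := by
        intro w hw
        rw [← hwfc, PySem.List.mem_sorted, List.mem_filter] at hw
        intro hmem
        have := hw.2
        rw [Bool.not_eq_true', ← Bool.not_eq_true] at this
        exact this ((PySem.Set.contains_iff _ _).mpr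
          ((PySem.Set.mem_ofList _ _).mpr hmem))
      dsimp only
      rw [pv_leftLoop_eq p0 d0 wf 0 hwfpair, pv_gapsLoop_eq wf hwfpair tl p0 d0 hrobpair]
      simp only [zero_add]
      rw [pv_dpLoop_eq wf]
      have hsufpair : (wf.dropWhile
          (fun w => decide (w < (tl.getLastD (p0, d0)).1))).Pairwise (fun a b => a ≤ b) :=
        List.Pairwise.sublist (List.dropWhile_sublist _) hwfpair
      rw [pv_rightLoop_eq _ _ 0 hsufpair]
      simp only [zero_add, List.tail_cons]
      congr 2
      -- right region: A counts walls ≤ bound in the suffix past the last robot,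
      -- B counts walls in (last, bound] over the whole list
      set lastp : Int := (tl.getLastD (p0, d0)).1 with hlastp
      set bound : Int := lastp + (tl.getLastD (p0, d0)).2 with hbound
      have hfull : wf.countP (fun w => decide (lastp < w ∧ w ≤ bound)) =
          (wf.dropWhile (fun w => decide (w < lastp))).countP
            (fun w => decide (lastp < w ∧ w ≤ bound)) := by
        refine (pv_countP_dropWhile_lt lastp _ wf ?_).symm
        intro w hw
        rw [decide_eq_false_iff_not]
        rintro ⟨h1, -⟩
        omega
      have hcongr : (wf.dropWhile (fun w => decide (w < lastp))).countP
            (fun w => decide (lastp < w ∧ w ≤ bound)) =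
          (wf.dropWhile (fun w => decide (w < lastp))).countP
            (fun w => decide (w ≤ bound)) := by
        apply List.countP_congr
        intro w hw
        have hge := pv_mem_dropWhile_not_lt lastp wf hwfpair w hw
        have hwwf : w ∈ wf := (List.dropWhile_sublist _).mem hw
        have hne' : w ≠ lastp := by
          intro h
          apply hmemwf w hwwf
          have : tl.getLastD (p0, d0) ∈ (p0, d0) :: tl := List.getLastD_mem_cons
          exact h ▸ List.mem_map_of_mem this
        simp only [decide_eq_true_eq]
        omega
      rw [hfull, hcongr]
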